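-- pv_equiv track=rewrite | github.com/MKowal2/NetDissect | src_video/data_utils.py | join_histogram
-- ===== SOURCE A (Python) =====
-- def join_histogram(histogram, newkeys):
--     '''Rekeys histogram according to newkeys map, summing joined buckets.'''
--     result = {}
--     for oldkey, newkey in newkeys.items():
--         if newkey not in result:
--             result[newkey] = histogram[oldkey]
--         else:
--             result[newkey] += histogram[oldkey]
--     return result
-- ===== SOURCE B (Python) =====
-- def join_histogram(histogram, newkeys):
--     '''Rekeys histogram according to newkeys map, summing joined buckets.'''
--     groups = {}
--     for oldkey, newkey in newkeys.items():
--         groups.setdefault(newkey, []).append(oldkey)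
--     return {nk: sum(histogram[o] for o in olds) for nk, olds in groups.items()}
-- ===== Notes on version B (the rewrite author's own statement) =====
-- stated objective: alternative
-- what changed: Replaces the single accumulating pass (insert-or-add per item) with an index-then-reduce shape: a first pass groups old keys by new key, a second pass emits each new key with the sum of its bucket's histogram values.
import Mathlib
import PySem

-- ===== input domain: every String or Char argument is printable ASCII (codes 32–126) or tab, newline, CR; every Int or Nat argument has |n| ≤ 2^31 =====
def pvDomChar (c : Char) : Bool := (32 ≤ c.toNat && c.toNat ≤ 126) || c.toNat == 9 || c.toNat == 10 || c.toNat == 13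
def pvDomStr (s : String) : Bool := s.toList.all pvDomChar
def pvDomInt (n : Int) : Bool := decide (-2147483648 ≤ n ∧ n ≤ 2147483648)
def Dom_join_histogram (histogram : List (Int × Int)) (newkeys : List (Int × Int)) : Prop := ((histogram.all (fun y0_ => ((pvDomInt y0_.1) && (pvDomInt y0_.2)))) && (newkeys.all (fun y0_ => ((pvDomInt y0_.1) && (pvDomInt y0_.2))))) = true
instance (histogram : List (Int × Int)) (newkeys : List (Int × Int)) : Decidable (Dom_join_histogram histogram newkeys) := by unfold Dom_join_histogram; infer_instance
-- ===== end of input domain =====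

-- B restates A's single accumulating pass as group-then-reduce (two passes); return value only, no speed claim.

-- ===== PORT A =====
def join_histogram (histogram : List (Int × Int)) (newkeys : List (Int × Int)) : List (Int × Int) :=
  ((PySem.Dict.ofList newkeys).items.foldl
    (fun r p =>
      if r.contains p.2 = false then
        r.insert p.2 ((PySem.Dict.ofList histogram).getD p.1 0)
      else
        r.insert p.2 (r.getD p.2 0 + (PySem.Dict.ofList histogram).getD p.1 0))
    PySem.Dict.empty).items

-- ===== PORT B =====
def join_histogram_alt (histogram : List (Int × Int)) (newkeys : List (Int × Int)) : List (Int × Int) :=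
  (((PySem.Dict.ofList newkeys).items.foldl
      (fun g p => g.modify p.2 [] (· ++ [p.1])) PySem.Dict.empty).items).map (fun q => (q.1, (q.2.map (fun o => (PySem.Dict.ofList histogram).getD o 0)).sum))

-- ===== PRECONDITION & SPEC =====
-- Pre_ excludes exactly the inputs on which Python A raises KeyError: some old key in
-- newkeys is not a key of histogram (B raises KeyError there too).
def Pre_join_histogram (histogram : List (Int × Int)) (newkeys : List (Int × Int)) : Prop :=
  ∀ p ∈ newkeys, p.1 ∈ histogram.map Prod.fst
instance (histogram : List (Int × Int)) (newkeys : List (Int × Int)) : Decidable (Pre_join_histogram histogram newkeys) := by unfold Pre_join_histogram; infer_instance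
def pvWitness_join_histogram : (List (Int × Int)) × (List (Int × Int)) := ([(1, 2), (3, 4)], [(1, 5), (3, 5)])
def Spec_join_histogram (histogram : List (Int × Int)) (newkeys : List (Int × Int)) (out : List (Int × Int)) : Prop := out = join_histogram_alt histogram newkeys
instance (histogram : List (Int × Int)) (newkeys : List (Int × Int)) (out : List (Int × Int)) : Decidable (Spec_join_histogram histogram newkeys out) := by unfold Spec_join_histogram; infer_instance

-- ===== CLAIM (what is proved, stated in full; the proofs are below) =====
def Claim_equal_join_histogram : Prop := ∀ (histogram : List (Int × Int)) (newkeys : List (Int × Int)), Dom_join_histogram histogram newkeys → Pre_join_histogram histogram newkeys → Spec_join_histogram histogram newkeys (join_histogram histogram newkeys)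

-- ===== LEMMAS AND PROOFS =====

-- A's loop body, written as a single insert (push the if inside the value).
theorem stepA_eq_insert (r : PySem.Dict Int Int) (k v : Int) :
    (if r.contains k = false then r.insert k v else r.insert k (r.getD k 0 + v))
      = r.insert k (if r.contains k = false then v else r.getD k 0 + v) := by
  by_cases h : r.contains k = false <;> simp [h]

-- getD of A's accumulating fold: initial value plus the sum of contributions at that key.
theorem foldA_getD (v : Int × Int → Int) (l : List (Int × Int)) (d : PySem.Dict Int Int) (c : Int) :
    (l.foldl (fun r p =>
        if r.contains p.2 = false then r.insert p.2 (v p)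
        else r.insert p.2 (r.getD p.2 0 + v p)) d).getD c 0
      = d.getD c 0 + ((l.filter (fun p => p.2 == c)).map v).sum := by
  induction l generalizing d with
  | nil => simp
  | cons p l ih =>
    simp only [List.foldl_cons, ih, List.filter_cons]
    by_cases hc : p.2 = c
    · subst hc
      by_cases h : d.contains p.2 = false <;>
        simp [h, PySem.Dict.getD_of_not_contains, add_assoc]
    · by_cases h : d.contains p.2 = false <;>
        simp [h, PySem.Dict.getD_insert, Ne.symm hc, hc]

theorem join_histogram_spec_aux (histogram : List (Int × Int)) (newkeys : List (Int × Int)) :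
    join_histogram histogram newkeys = join_histogram_alt histogram newkeys := by
  unfold join_histogram join_histogram_alt
  set H := PySem.Dict.ofList histogram with hH
  set l := (PySem.Dict.ofList newkeys).items with hl
  set v : Int × Int → Int := fun p => H.getD p.1 0 with hv
  set A : PySem.Dict Int Int :=
    l.foldl (fun r p =>
      if r.contains p.2 = false then r.insert p.2 (v p)
      else r.insert p.2 (r.getD p.2 0 + v p)) PySem.Dict.empty with hA
  set G : PySem.Dict Int (List Int) :=
    l.foldl (fun g p => g.modify p.2 [] (· ++ [p.1])) PySem.Dict.empty with hG
  -- keys of both folds: first-appearance order of the new keys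
  have hAkeys : A.keys = PySem.Set.update ([] : List Int) (l.map (·.2)) := by
    rw [hA]
    simp only [stepA_eq_insert]
    rw [PySem.Dict.keys_foldl_insert_key l (·.2)
      (fun r p => if r.contains p.2 = false then v p else r.getD p.2 0 + v p) PySem.Dict.empty]
    simp
  have hGkeys : G.keys = PySem.Set.update ([] : List Int) (l.map (·.2)) := by
    rw [hG]
    rw [PySem.Dict.keys_foldl_modify_key l (·.2) [] (fun g p => (· ++ [p.1])) PySem.Dict.empty]
    simp
  have hAnodup : A.keys.Nodup := by
    rw [hA]; simp only [stepA_eq_insert]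
    exact PySem.Dict.nodup_keys_foldl_insert_key l (·.2) _ _ PySem.Dict.nodup_keys_empty
  have hGnodup : G.keys.Nodup := by
    rw [hG]
    exact PySem.Dict.nodup_keys_foldl_modify_key l (·.2) [] _ _ PySem.Dict.nodup_keys_empty
  -- each group is the list of old keys mapped to that new key
  have hGgetD : ∀ c : Int, G.getD c [] = (l.filter (fun p => p.2 == c)).map (·.1) := by
    intro c
    have hswap : G = (l.map Prod.swap).foldl (fun g q => g.modify q.1 [] (· ++ [q.2]))
        PySem.Dict.empty := by
      rw [hG, List.foldl_map]
      rfl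
    rw [hswap, PySem.Dict.getD_foldl_modify_append]
    simp [List.filter_map, Function.comp_def, Prod.swap]
  have hAgetD : ∀ c : Int, A.getD c 0 = ((l.filter (fun p => p.2 == c)).map v).sum := by
    intro c; rw [hA, foldA_getD]; simp
  -- items of both sides, compared key by key
  rw [PySem.Dict.items_eq_map_keys A hAnodup 0,
      PySem.Dict.items_eq_map_keys G hGnodup [], hAkeys, hGkeys, List.map_map]
  refine List.map_congr_left ?_
  intro k _
  simp only [Function.comp_apply]
  rw [hAgetD k, hGgetD k, List.map_map]
  rfl

-- ===== VERDICT (by name: the statement is the Claim_ definition above) =====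
theorem join_histogram_spec : Claim_equal_join_histogram := by
  intro histogram newkeys _ _
  exact join_histogram_spec_aux histogram newkeys
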